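-- pv_equiv track=rewrite | github.com/Coleridge-Initiative/rc-kaggle-models | 1st ZALO FTW/data_loader.py | _find_match_position
-- ===== SOURCE A (Python) =====
-- def _find_match_position(inp_string, label_string):
--     """Find start end character index of label_string in inp_string
--
--     Args:
--         inp_string: raw input string
--         label-string: raw label_string
--
--     Returns:
--         idx0: The start character index of label_string in inp_string
--         idx1: The end character index of label_string in inp_string
--     """
--
--     inp_string = " ".join(str(inp_string).split()).strip()
--     label_string = " ".join(str(label_string).split()).strip()
--
--     if len(label_string) == 0:
--         return None, None
--     else:
--         idx0 = None
--         idx1 = None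
--         len_query = len(label_string)
--         for ind in (i for i, e in enumerate(inp_string) if e == label_string[0]):
--             if inp_string[ind : ind + len_query] == label_string:
--                 idx0 = ind
--                 idx1 = ind + len_query
--                 break
--
--         return idx0, idx1
-- ===== SOURCE B (Python) =====
-- def _find_match_position(inp_string, label_string):
--     inp_string = " ".join(str(inp_string).split()).strip()
--     label_string = " ".join(str(label_string).split()).strip()
--     m = len(label_string)
--     if m == 0:
--         return None, None
--     n = len(inp_string)
--     if m > n:
--         return None, None
--     # Rabin-Karp: rolling polynomial hash, verify on hash hit.
--     MOD = (1 << 61) - 1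
--     BASE = 256
--     ht = 0
--     for c in label_string:
--         ht = (ht * BASE + ord(c)) % MOD
--     hw = 0
--     for c in inp_string[:m]:
--         hw = (hw * BASE + ord(c)) % MOD
--     pw = pow(BASE, m - 1, MOD)
--     for i in range(n - m + 1):
--         if hw == ht and inp_string[i : i + m] == label_string:
--             return i, i + m
--         if i + m < n:
--             hw = ((hw - ord(inp_string[i]) * pw) * BASE + ord(inp_string[i + m])) % MOD
--     return None, None
-- ===== Notes on version B (the rewrite author's own statement) =====
-- stated objective: alternative
-- what changed: Replaces A's scan over first-character candidate positions with per-candidate slice comparison by a Rabin-Karp search: a rolling polynomial hash over every window with the slice compared only on a hash hit.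
import Mathlib
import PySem

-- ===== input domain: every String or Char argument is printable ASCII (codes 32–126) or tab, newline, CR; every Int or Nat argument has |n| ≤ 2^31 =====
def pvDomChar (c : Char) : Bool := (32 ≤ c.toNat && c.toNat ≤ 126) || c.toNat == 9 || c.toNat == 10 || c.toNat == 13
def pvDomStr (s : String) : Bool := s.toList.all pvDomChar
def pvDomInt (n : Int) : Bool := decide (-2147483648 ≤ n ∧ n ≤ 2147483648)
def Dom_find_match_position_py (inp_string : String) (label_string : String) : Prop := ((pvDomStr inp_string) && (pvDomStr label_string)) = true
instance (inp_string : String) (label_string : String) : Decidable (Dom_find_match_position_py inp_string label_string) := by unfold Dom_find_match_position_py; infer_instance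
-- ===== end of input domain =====

-- B replaces A's per-candidate slice-comparison scan by Rabin-Karp (rolling polynomial
-- hash, slice compared only on a hash hit); return value only, no mutation.

-- ' '.join(x.split()).strip() — the whitespace normalization both programs perform
def pvNormalize (cs : List Char) : List Char :=
  PySem.Chars.strip (PySem.Chars.join [' '] (PySem.Chars.split₀ cs))

-- ===== PORT A =====
-- A's generator loop: over enumerate(inp_string), filtered on e == label_string[0],
-- check inp_string[ind : ind+len_query] == label_string, break at the first hit.
def pvLoopA (s l : List Char) (c0 : Char) (lenQ : Int) : List (Int × Char) → Option Int
  | [] => none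
  | (i, e) :: rest =>
    if e == c0 then
      if PySem.List.slice s (some i) (some (i + lenQ)) == l then some i
      else pvLoopA s l c0 lenQ rest
    else pvLoopA s l c0 lenQ rest

def find_match_position_py (inp_string : String) (label_string : String) : Option Int × Option Int :=
  let s := pvNormalize inp_string.toList
  let l := pvNormalize label_string.toList
  if l.length = 0 then (none, none)
  else
    let lenQ : Int := l.length
    match pvLoopA s l (l.headD ' ') lenQ (PySem.List.enumerate s 0) with
    | none => (none, none)
    | some i => (some i, some (i + lenQ))

-- ===== PORT B =====
-- MOD = 2**61 - 1, BASE = 256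
def pvMod : Int := 2305843009213693951
def pvBase : Int := 256

-- one step of the polynomial-hash loop: h = (h * BASE + ord(c)) % MOD
def pvHStep (h : Int) (c : Char) : Int := PySem.Int.mod (h * pvBase + (c.toNat : Int)) pvMod

-- 'ht = 0; for c in w: ht = (ht * BASE + ord(c)) % MOD'
def pvHash (w : List Char) : Int := w.foldl pvHStep 0

-- 'for i in range(n - m + 1): …' — fuel counts the remaining iterations
def pvLoopB (s t : List Char) (ht pw : Int) (m n : Nat) : Nat → Nat → Int → Option Int × Option Int
  | 0, _, _ => (none, none)
  | fuel + 1, i, hw =>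
    if hw == ht && (PySem.List.slice s (some (i : Int)) (some ((i : Int) + (m : Int))) == t) then
      (some (i : Int), some ((i : Int) + (m : Int)))
    else if i + m < n then
      -- indices i and i+m are in range here, so getD is exact for Python's s[i], s[i+m]
      pvLoopB s t ht pw m n fuel (i + 1)
        (PySem.Int.mod ((hw - ((s.getD i ' ').toNat : Int) * pw) * pvBase
          + ((s.getD (i + m) ' ').toNat : Int)) pvMod)
    else
      pvLoopB s t ht pw m n fuel (i + 1) hw

def find_match_position_py_alt (inp_string : String) (label_string : String) : Option Int × Option Int :=
  let s := pvNormalize inp_string.toList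
  let t := pvNormalize label_string.toList
  let m := t.length
  if m = 0 then (none, none)
  else
    let n := s.length
    if m > n then (none, none)
    else
      let ht := pvHash t
      let hw := pvHash (PySem.List.slice s none (some (m : Int)))
      -- pow(BASE, m - 1, MOD)
      let pw := PySem.Int.powMod pvBase (m - 1) pvMod
      pvLoopB s t ht pw m n (n - m + 1) 0 hw

-- ===== PRECONDITION & SPEC =====
def Spec_find_match_position_py (inp_string : String) (label_string : String) (out : Option Int × Option Int) : Prop := out = find_match_position_py_alt inp_string label_string
instance (inp_string : String) (label_string : String) (out : Option Int × Option Int) : Decidable (Spec_find_match_position_py inp_string label_string out) := by unfold Spec_find_match_position_py; infer_instance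

-- ===== CLAIM (what is proved, stated in full; the proofs are below) =====
def Claim_equal_find_match_position_py : Prop := ∀ (inp_string : String) (label_string : String), Dom_find_match_position_py inp_string label_string → Spec_find_match_position_py inp_string label_string (find_match_position_py inp_string label_string)

-- ===== LEMMAS AND PROOFS =====

-- the first-occurrence value both programs compute, used only by the proofs
def pvCanon (inp label : String) : Option Int × Option Int :=
  let s := pvNormalize inp.toList
  let l := pvNormalize label.toList
  if l = [] then (none, none)
  else if PySem.Chars.find s l = -1 then (none, none)
  else (some (PySem.Chars.find s l), some (PySem.Chars.find s l + (l.length : Int)))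

-- find u l is the unique first index whose drop has l as a prefix
lemma pv_find_first (u l : List Char) (n : Nat) (h1 : l <+: u.drop n)
    (h2 : ∀ i < n, ¬ l <+: u.drop i) : PySem.Chars.find u l = (n : Int) := by
  have hinf : l <:+: u := h1.isInfix.trans (List.drop_suffix n u).isInfix
  have hne : PySem.Chars.find u l ≠ -1 := (PySem.Chars.find_ne_neg_one_iff u l).mpr hinf
  have hnn : 0 ≤ PySem.Chars.find u l := by
    have := PySem.Chars.neg_one_le_find u l; omega
  obtain ⟨hp, hmin⟩ := PySem.Chars.find_spec hnn
  have hmn : (PySem.Chars.find u l).toNat = n := by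
    rcases lt_trichotomy (PySem.Chars.find u l).toNat n with h | h | h
    · exact absurd hp (h2 _ h)
    · exact h
    · exact absurd h1 (hmin n h)
  omega

-- one-step recurrence for find on a cons
lemma pv_find_cons (c : Char) (t l : List Char) :
    PySem.Chars.find (c :: t) l =
      if l <+: (c :: t) then 0
      else if PySem.Chars.find t l = -1 then -1 else PySem.Chars.find t l + 1 := by
  by_cases hp : l <+: (c :: t)
  · rw [if_pos hp]
    exact pv_find_first (c :: t) l 0 (by simpa using hp) (by omega)
  · rw [if_neg hp]
    by_cases h2 : PySem.Chars.find t l = -1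
    · rw [if_pos h2]
      refine (PySem.Chars.find_eq_neg_one_iff _ _).mpr ?_
      rw [List.infix_cons_iff]
      exact fun h => h.elim hp ((PySem.Chars.find_eq_neg_one_iff t l).mp h2)
    · rw [if_neg h2]
      have hnn : 0 ≤ PySem.Chars.find t l := by
        have := PySem.Chars.neg_one_le_find t l; omega
      obtain ⟨hq, hmin⟩ := PySem.Chars.find_spec hnn
      have : PySem.Chars.find (c :: t) l = (((PySem.Chars.find t l).toNat + 1 : Nat) : Int) := by
        refine pv_find_first (c :: t) l ((PySem.Chars.find t l).toNat + 1) (by simpa using hq) ?_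
        intro i hi
        match i with
        | 0 => simpa using hp
        | Nat.succ j =>
          simpa using hmin j (by omega)
      omega

-- A's candidate loop over the enumeration of a suffix computes find on that suffix
lemma pv_loop_eq (l : List Char) (c0 : Char) (hc : l.head? = some c0) (s : List Char) :
    ∀ (t : List Char) (k : Nat), t = s.drop k →
      pvLoopA s l c0 (l.length : Int) (PySem.List.enumerate t (k : Int)) =
        (if PySem.Chars.find t l = -1 then none
         else some ((k : Int) + PySem.Chars.find t l)) := by
  obtain ⟨ls, rfl⟩ : ∃ ls, l = c0 :: ls := by
    cases l with
    | nil => simp at hc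
    | cons a as => exact ⟨as, by rw [Option.some.inj hc]⟩
  intro t
  induction t with
  | nil =>
    intro k hk
    rw [PySem.List.enumerate_nil]
    have : PySem.Chars.find [] (c0 :: ls) = -1 := by
      rw [PySem.Chars.find_eq_neg_one_iff]
      simp
    simp [pvLoopA, this]
  | cons c t' ih =>
    intro k hk
    have hk1 : t' = s.drop (k + 1) := by rw [← List.tail_drop, ← hk]; rfl
    have hsl : PySem.List.slice s (some (k : Int)) (some ((k : Int) + ((c0 :: ls).length : Int)))
        = (c :: t').take (c0 :: ls).length := by
      rw [PySem.List.slice_natCast_add, ← hk]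
    rw [PySem.List.enumerate_cons]
    simp only [pvLoopA]
    by_cases hpre : (c0 :: ls) <+: (c :: t')
    · have hc0 : c0 = c := (List.cons_prefix_cons.mp hpre).1
      have hcc : (c == c0) = true := beq_iff_eq.mpr hc0.symm
      have hsl2 : (PySem.List.slice s (some (k : Int)) (some ((k : Int) + ((c0 :: ls).length : Int)))
          == (c0 :: ls)) = true := by
        rw [hsl, beq_iff_eq]
        exact (List.prefix_iff_eq_take.mp hpre).symm
      rw [hcc, hsl2, pv_find_cons, if_pos hpre]
      norm_num
    · have hsl2 : (PySem.List.slice s (some (k : Int)) (some ((k : Int) + ((c0 :: ls).length : Int)))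
          == (c0 :: ls)) = false := by
        rw [hsl, beq_eq_false_iff_ne]
        intro h
        exact hpre (List.prefix_iff_eq_take.mpr h.symm)
      have hrec : pvLoopA s (c0 :: ls) c0 ((c0 :: ls).length : Int)
          (PySem.List.enumerate t' ((k : Int) + 1)) =
          (if PySem.Chars.find t' (c0 :: ls) = -1 then none
           else some (((k + 1 : Nat) : Int) + PySem.Chars.find t' (c0 :: ls))) := by
        have := ih (k + 1) hk1
        rwa [Nat.cast_add, Nat.cast_one] at this
      rw [hsl2]
      simp only [Bool.false_eq_true, if_false, ite_self]
      rw [hrec, pv_find_cons, if_neg hpre]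
      by_cases h2 : PySem.Chars.find t' (c0 :: ls) = -1
      · simp [h2]
      · have hne : ¬ (PySem.Chars.find t' (c0 :: ls) + 1 = -1) := by
          have := PySem.Chars.neg_one_le_find t' (c0 :: ls); omega
        rw [if_neg h2, if_neg h2, if_neg hne]
        congr 1
        push_cast
        ring

-- A computes pvCanon
lemma pv_A_canon (inp label : String) :
    find_match_position_py inp label = pvCanon inp label := by
  unfold find_match_position_py pvCanon
  set s := pvNormalize inp.toList with hs
  set l := pvNormalize label.toList with hl
  by_cases h0 : l = []
  · simp [h0]
  · have hlen : ¬ l.length = 0 := by simpa using h0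
    have hc : l.head? = some (l.headD ' ') := by
      obtain ⟨a, as, h⟩ := List.exists_cons_of_ne_nil h0
      rw [h]
      rfl
    have hloop := pv_loop_eq l (l.headD ' ') hc s s 0 (by simp)
    rw [Nat.cast_zero] at hloop
    simp only [hlen, if_false, if_neg h0, hloop, zero_add]
    by_cases hf : PySem.Chars.find s l = -1 <;> simp [hf]

-- ===== B-side lemmas: hash correctness =====

def pvP : Nat := 2305843009213693951

lemma pvMod_eq : pvMod = (pvP : Int) := by norm_num [pvMod, pvP]

lemma pvMod_pos : (0 : Int) < pvMod := by norm_num [pvMod]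

-- the same hash step / hash over ZMod pvP
def pvZStep (h : ZMod pvP) (c : Char) : ZMod pvP := h * 256 + ((c.toNat : Int) : ZMod pvP)
def pvZHash (w : List Char) : ZMod pvP := w.foldl pvZStep 0

lemma pv_cast_mod (x : Int) : ((PySem.Int.mod x pvMod : Int) : ZMod pvP) = (x : ZMod pvP) := by
  rw [PySem.Int.mod_eq_emod_of_pos pvMod_pos, pvMod_eq, ZMod.intCast_mod]

lemma pv_hash_cast (w : List Char) : ∀ acc : Int,
    ((w.foldl pvHStep acc : Int) : ZMod pvP) = w.foldl pvZStep ((acc : Int) : ZMod pvP) := by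
  induction w with
  | nil => intro acc; rfl
  | cons c w ih =>
    intro acc
    simp only [List.foldl_cons]
    rw [ih]
    congr 1
    unfold pvHStep pvZStep pvBase
    rw [pv_cast_mod]
    push_cast
    ring

lemma pvHash_cast (w : List Char) : ((pvHash w : Int) : ZMod pvP) = pvZHash w := by
  unfold pvHash pvZHash
  rw [pv_hash_cast]
  norm_num

lemma pv_hash_range_aux : ∀ (w : List Char) (c : Char) (acc : Int),
    0 ≤ (c :: w).foldl pvHStep acc ∧ (c :: w).foldl pvHStep acc < pvMod := by
  intro w
  induction w with
  | nil =>
    intro c acc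
    simp only [List.foldl_cons, List.foldl_nil]
    exact ⟨PySem.Int.mod_nonneg _ pvMod_pos, PySem.Int.mod_lt _ pvMod_pos⟩
  | cons d w' ih =>
    intro c acc
    rw [List.foldl_cons]
    exact ih d (pvHStep acc c)

lemma pvHash_range (w : List Char) : 0 ≤ pvHash w ∧ pvHash w < pvMod := by
  cases w with
  | nil => exact ⟨le_refl 0, pvMod_pos⟩
  | cons c w => exact pv_hash_range_aux w c 0

lemma pv_int_eq {a b : Int} (ha : 0 ≤ a ∧ a < pvMod) (hb : 0 ≤ b ∧ b < pvMod)
    (h : (a : ZMod pvP) = (b : ZMod pvP)) : a = b := by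
  have h2 : a % (pvP : Int) = b % (pvP : Int) := (ZMod.intCast_eq_intCast_iff a b pvP).mp h
  rw [Int.emod_eq_of_lt ha.1 (by rw [← pvMod_eq]; exact ha.2),
      Int.emod_eq_of_lt hb.1 (by rw [← pvMod_eq]; exact hb.2)] at h2
  exact h2

-- the polynomial-hash accumulator identity over ZMod
lemma pvZ_acc (w : List Char) : ∀ acc : ZMod pvP,
    w.foldl pvZStep acc = acc * 256 ^ w.length + pvZHash w := by
  induction w with
  | nil => intro acc; simp [pvZHash]
  | cons c w ih =>
    intro acc
    have h1 : pvZHash (c :: w) = pvZStep 0 c * 256 ^ w.length + pvZHash w := by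
      unfold pvZHash
      rw [List.foldl_cons]
      exact ih (pvZStep 0 c)
    rw [List.foldl_cons, ih (pvZStep acc c), h1]
    simp only [pvZStep, List.length_cons]
    ring

lemma pvZHash_cons (c : Char) (w : List Char) :
    pvZHash (c :: w) = pvZStep 0 c * 256 ^ w.length + pvZHash w := by
  unfold pvZHash
  rw [List.foldl_cons]
  exact pvZ_acc w (pvZStep 0 c)

lemma pvZHash_append_singleton (w : List Char) (b : Char) :
    pvZHash (w ++ [b]) = pvZHash w * 256 + ((b.toNat : Int) : ZMod pvP) := by
  unfold pvZHash
  rw [List.foldl_append, List.foldl_cons, List.foldl_nil]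
  rfl

lemma pv_powMod_cast (e : Nat) :
    ((PySem.Int.powMod pvBase e pvMod : Int) : ZMod pvP) = (256 : ZMod pvP) ^ e := by
  rw [PySem.Int.powMod_eq, pv_cast_mod]
  push_cast [pvBase]
  ring

-- the rolling-hash update is exact: from the hash of window i to the hash of window i+1
lemma pv_roll (s : List Char) (i m : Nat) (hm : 1 ≤ m) (hlt : i + m < s.length) :
    PySem.Int.mod ((pvHash ((s.drop i).take m)
        - ((s.getD i ' ').toNat : Int) * PySem.Int.powMod pvBase (m - 1) pvMod) * pvBase
        + ((s.getD (i + m) ' ').toNat : Int)) pvMod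
      = pvHash ((s.drop (i + 1)).take m) := by
  have hi : i < s.length := by omega
  have him : i + m < s.length := hlt
  have hlen1 : (s.drop (i + 1)).length = s.length - (i + 1) := List.length_drop
  set u : List Char := (s.drop (i + 1)).take (m - 1) with hu
  have hulen : u.length = m - 1 := by
    rw [hu, List.length_take, hlen1]
    omega
  have hwin1 : (s.drop i).take m = s[i] :: u := by
    obtain ⟨m', rfl⟩ : ∃ m', m = m' + 1 := ⟨m - 1, by omega⟩
    rw [List.drop_eq_getElem_cons hi, List.take_succ_cons]
    simp [hu]
  have hm'lt : m - 1 < (s.drop (i + 1)).length := by rw [hlen1]; omega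
  have hwin2 : (s.drop (i + 1)).take m = u ++ [s[i + m]] := by
    obtain ⟨m', rfl⟩ : ∃ m', m = m' + 1 := ⟨m - 1, by omega⟩
    rw [List.take_add_one, List.getElem?_eq_getElem (by rw [hlen1]; omega), List.getElem_drop]
    have he : i + 1 + m' = i + (m' + 1) := by omega
    simp [hu, he]
  have hga : s.getD i ' ' = s[i] := List.getD_eq_getElem s ' ' hi
  have hgb : s.getD (i + m) ' ' = s[i + m] := List.getD_eq_getElem s ' ' him
  apply pv_int_eq
  · exact ⟨PySem.Int.mod_nonneg _ pvMod_pos, PySem.Int.mod_lt _ pvMod_pos⟩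
  · exact pvHash_range _
  · rw [pv_cast_mod]
    push_cast
    rw [pvHash_cast, pvHash_cast, pv_powMod_cast, hwin1, hwin2,
        pvZHash_cons, pvZHash_append_singleton, hulen, hga, hgb]
    simp only [pvZStep, pvBase]
    push_cast
    ring

-- B's loop finds the first window equal to t (the hash check is conservative)
lemma pv_loopB_eq (s t : List Char) (m n : Nat) (hm : m = t.length) (hm1 : 1 ≤ m)
    (hn : n = s.length) :
    ∀ (fuel i : Nat) (hw : Int), i + fuel = n - m + 1 → i + m ≤ n →
      hw = pvHash ((s.drop i).take m) →
      pvLoopB s t (pvHash t) (PySem.Int.powMod pvBase (m - 1) pvMod) m n fuel i hw =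
        (if PySem.Chars.find (s.drop i) t = -1 then (none, none)
         else (some ((i : Int) + PySem.Chars.find (s.drop i) t),
               some ((i : Int) + PySem.Chars.find (s.drop i) t + (m : Int)))) := by
  subst hn
  intro fuel
  induction fuel with
  | zero => intro i hw h1 h2 h3; omega
  | succ fuel ih =>
    intro i hw h1 h2 h3
    subst h3
    have hsl : PySem.List.slice s (some (i : Int)) (some ((i : Int) + (m : Int)))
        = (s.drop i).take m := PySem.List.slice_natCast_add s i m
    simp only [pvLoopB, hsl]
    by_cases hpre : t <+: s.drop i
    · -- window equals t: hash hit and slice hit, the loop stops at i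
      have hwin : (s.drop i).take m = t := by
        rw [hm]
        exact (List.prefix_iff_eq_take.mp hpre).symm
      have hf0 : PySem.Chars.find (s.drop i) t = 0 := by
        have := pv_find_first (s.drop i) t 0 (by simpa using hpre) (by omega)
        simpa using this
      rw [hwin, hf0]
      simp
    · have hne : ((s.drop i).take m == t) = false := by
        rw [beq_eq_false_iff_ne]
        intro h
        exact hpre (List.prefix_iff_eq_take.mpr (by rw [← hm, h]))
      rw [hne, Bool.and_false, if_neg (by simp)]
      have hi : i < s.length := by omega
      have hdropcons : s.drop i = s[i] :: s.drop (i + 1) := List.drop_eq_getElem_cons hi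
      have hpre' : ¬ t <+: s[i] :: s.drop (i + 1) := hdropcons ▸ hpre
      by_cases hlt : i + m < s.length
      · rw [if_pos hlt,
            ih (i + 1) _ (by omega) (by omega) (pv_roll s i m hm1 hlt),
            hdropcons, pv_find_cons, if_neg hpre']
        by_cases h2f : PySem.Chars.find (s.drop (i + 1)) t = -1
        · simp [h2f]
        · have hge : -1 ≤ PySem.Chars.find (s.drop (i + 1)) t :=
            PySem.Chars.neg_one_le_find _ _
          rw [if_neg h2f, if_neg h2f, if_neg (by omega)]
          simp only [Option.some.injEq, Prod.mk.injEq]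
          constructor
          · push_cast; ring
          · push_cast; ring
      · -- last iteration: the remaining suffix has exactly length m, no match left
        rw [if_neg hlt]
        have hfuel : fuel = 0 := by omega
        have hfneg : PySem.Chars.find (s.drop i) t = -1 := by
          rw [PySem.Chars.find_eq_neg_one_iff]
          intro hinf
          have hlen : (s.drop i).length = m := by
            rw [List.length_drop]; omega
          have ht : t = s.drop i := hinf.sublist.eq_of_length (by omega)
          exact hpre (ht ▸ List.prefix_refl t)
        rw [hfuel, hfneg]
        simp [pvLoopB]

-- B computes pvCanon
lemma pv_B_canon (inp label : String) :
    find_match_position_py_alt inp label = pvCanon inp label := by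
  unfold find_match_position_py_alt pvCanon
  set s := pvNormalize inp.toList with hs
  set t := pvNormalize label.toList with ht
  by_cases h0 : t = []
  · simp [h0]
  · have hm1 : 1 ≤ t.length := List.length_pos_iff.mpr h0
    have hlen : ¬ t.length = 0 := by omega
    simp only [if_neg hlen, if_neg h0]
    by_cases hgt : t.length > s.length
    · -- pattern longer than text: no occurrence
      have hf : PySem.Chars.find s t = -1 := by
        rw [PySem.Chars.find_eq_neg_one_iff]
        intro hinf
        have := hinf.length_le
        omega
      simp [hgt, hf]
    · rw [if_neg hgt]
      have hsl0 : PySem.List.slice s none (some ((t.length : Nat) : Int)) = s.take t.length := by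
        rw [PySem.List.slice_to s (by positivity)]
        simp
      have hloop := pv_loopB_eq s t t.length s.length rfl hm1 rfl
        (s.length - t.length + 1) 0 (pvHash (PySem.List.slice s none (some (t.length : Int))))
        (by omega) (by omega) (by rw [hsl0]; simp [pvHash])
      rw [hloop]
      simp only [List.drop_zero]
      by_cases hf : PySem.Chars.find s t = -1
      · simp [hf]
      · simp only [if_neg hf, Nat.cast_zero, zero_add]

-- ===== VERDICT (by name: the statement is the Claim_ definition above) =====
theorem find_match_position_py_spec : Claim_equal_find_match_position_py := by
  intro inp label _
  unfold Spec_find_match_position_py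
  rw [pv_A_canon, pv_B_canon]
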